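-- pv_equiv track=rewrite | github.com/executablebooks/mistletoe-ebp | mistletoe/block_tokens.py | strip
-- ===== SOURCE A (Python) =====
-- def strip(string):
--     count = 0
--     for i, c in enumerate(string):
--         if c == "\t":
--             return string[i + 1 :]
--         elif c == " ":
--             count += 1
--         else:
--             break
--         if count == 4:
--             return string[i + 1 :]
--     return string
-- ===== SOURCE B (Python) =====
-- def strip(string):
--     stripped = string.lstrip(' ')
--     n = len(string) - len(stripped)
--     if n >= 4:
--         return string[4:]
--     if stripped.startswith('\t'):
--         return string[n + 1:]
--     return string
-- ===== Notes on version B (the rewrite author's own statement) =====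
-- stated objective: simpler
-- what changed: Replaced the per-character enumerate loop with stateful count by a closed-form computation: count leading spaces via lstrip, then pick the cut point (4 spaces -> string[4:], tab after n<4 spaces -> string[n+1:], else unchanged).
import Mathlib
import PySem

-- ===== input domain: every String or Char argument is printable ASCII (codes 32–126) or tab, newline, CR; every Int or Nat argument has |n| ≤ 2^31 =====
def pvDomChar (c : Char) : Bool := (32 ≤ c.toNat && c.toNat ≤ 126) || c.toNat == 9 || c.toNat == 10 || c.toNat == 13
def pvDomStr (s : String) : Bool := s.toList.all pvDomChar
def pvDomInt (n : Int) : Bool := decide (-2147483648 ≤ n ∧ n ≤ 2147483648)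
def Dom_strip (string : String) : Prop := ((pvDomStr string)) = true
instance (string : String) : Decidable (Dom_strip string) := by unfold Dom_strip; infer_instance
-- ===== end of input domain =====

-- B replaces A's per-character enumerate loop (with a space counter and early returns)
-- by a closed-form cut point derived from lstrip(' '): simpler, no explicit loop.


-- ===== PORT A =====
-- the for-loop over enumerate(string): t is the not-yet-scanned suffix (= full.drop i),
-- i the current index, count the space counter; string[i+1:] = full.drop (i+1) (index ≥ 0, exact)
def stripGo (t : List Char) (i : Nat) (count : Nat) (full : List Char) : String :=
  match t with
  | [] => String.ofList full                                   -- loop ended: return string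
  | c :: rest =>
    if c = '\t' then String.ofList (full.drop (i + 1))         -- return string[i+1:]
    else if c = ' ' then
      if count + 1 = 4 then String.ofList (full.drop (i + 1))  -- count == 4: return string[i+1:]
      else stripGo rest (i + 1) (count + 1) full
    else String.ofList full                                    -- break; return string

def strip (string : String) : String :=
  stripGo string.toList 0 0 string.toList

-- ===== PORT B =====
def strip_alt (string : String) : String :=
  let l := string.toList
  let stripped := l.dropWhile (fun c => c = ' ')  -- string.lstrip(' '): drop leading spaces (exact)
  let n := l.length - stripped.length
  if 4 ≤ n then String.ofList (l.drop 4)                              -- string[4:]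
  else if stripped.headD ' ' = '\t' then String.ofList (l.drop (n + 1))  -- startswith('\t') → string[n+1:]
  else string

-- ===== PRECONDITION & SPEC =====
def Spec_strip (string : String) (out : String) : Prop := out = strip_alt string
instance (string : String) (out : String) : Decidable (Spec_strip string out) := by unfold Spec_strip; infer_instance

-- ===== CLAIM (what is proved, stated in full; the proofs are below) =====
def Claim_equal_strip : Prop := ∀ (string : String), Dom_strip string → Spec_strip string (strip string)

-- ===== LEMMAS AND PROOFS =====

-- B on the list level (strip_alt string = stripAltList string.toList, proved below)
def stripAltList (l : List Char) : String :=
  let stripped := l.dropWhile (fun c => c = ' ')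
  let n := l.length - stripped.length
  if 4 ≤ n then String.ofList (l.drop 4)
  else if stripped.headD ' ' = '\t' then String.ofList (l.drop (n + 1))
  else String.ofList l

lemma strip_alt_eq_list (s : String) : strip_alt s = stripAltList s.toList := by
  simp only [strip_alt, stripAltList]
  split_ifs <;> simp

lemma dropWhile_replicate_append (i : Nat) (t : List Char) :
    (List.replicate i ' ' ++ t).dropWhile (fun c => c = ' ') = t.dropWhile (fun c => c = ' ') := by
  induction i with
  | zero => simp
  | succ k ih => simp [List.replicate_succ, List.dropWhile, ih]

lemma go_spec (t : List Char) : ∀ (full : List Char) (i : Nat),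
    full.drop i = t → full.take i = List.replicate i ' ' → i ≤ 3 →
    stripGo t i i full = stripAltList full := by
  induction t with
  | nil =>
    intro full i hd ht hi
    have hlen : full.length ≤ i := by
      have := congrArg List.length hd; simp at this; omega
    have hfull : full = List.replicate i ' ' := by
      rw [← ht, List.take_of_length_le hlen]
    have hdw : full.dropWhile (fun c => c = ' ') = [] := by
      rw [hfull]
      have := dropWhile_replicate_append i []
      simpa using this
    have hA : stripGo [] i i full = String.ofList full := by simp [stripGo]
    have h4 : ¬ (4 ≤ full.length - (full.dropWhile (fun c => c = ' ')).length) := by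
      rw [hdw]; simp; omega
    have hB : stripAltList full = String.ofList full := by
      simp only [stripAltList]; rw [if_neg h4, hdw]; simp
    rw [hA, hB]
  | cons c rest ih =>
    intro full i hd ht hi
    have hdecomp : full = List.replicate i ' ' ++ c :: rest := by
      conv_lhs => rw [← List.take_append_drop i full, ht, hd]
    by_cases hc : c = '\t'
    · subst hc
      have hdw : full.dropWhile (fun c => c = ' ') = '\t' :: rest := by
        rw [hdecomp, dropWhile_replicate_append]; simp [List.dropWhile]
      have hn : full.length - (full.dropWhile (fun c => c = ' ')).length = i := by
        rw [hdw, hdecomp]; simp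
      have hA : stripGo ('\t' :: rest) i i full = String.ofList (full.drop (i + 1)) := by
        simp [stripGo]
      have hB : stripAltList full = String.ofList (full.drop (i + 1)) := by
        simp only [stripAltList]
        rw [hn, if_neg (show ¬ (4:ℕ) ≤ i by omega), hdw]; simp
      rw [hA, hB]
    · by_cases hsp : c = ' '
      · subst hsp
        by_cases h4 : i + 1 = 4
        · have hi3 : i = 3 := by omega
          subst hi3
          have hdecomp4 : full = List.replicate 4 ' ' ++ rest := by
            simpa [List.replicate_succ'] using hdecomp
          have hge : 4 ≤ full.length - (full.dropWhile (fun c => c = ' ')).length := by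
            rw [hdecomp4, dropWhile_replicate_append]
            have := List.length_dropWhile_le (p := fun c => decide (c = ' ')) rest
            simp; omega
          have hA : stripGo (' ' :: rest) 3 3 full = String.ofList (full.drop 4) := by
            simp [stripGo]
          have hB : stripAltList full = String.ofList (full.drop 4) := by
            simp only [stripAltList]; rw [if_pos hge]
          rw [hA, hB]
        · have hstep := ih full (i + 1)
            (by
              have := congrArg (List.drop 1) hd
              simpa [List.drop_drop, Nat.add_comm] using this)
            (by
              have hget : full[i]? = some ' ' := by
                rw [hdecomp]; simp
              rw [List.take_add_one, ht, hget]
              simp [← List.replicate_succ'])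
            (by omega)
          simpa [stripGo, h4] using hstep
      · -- break: c is neither tab nor space
        have hdw : full.dropWhile (fun c => c = ' ') = c :: rest := by
          rw [hdecomp, dropWhile_replicate_append]; simp [List.dropWhile, hsp]
        have hn : full.length - (full.dropWhile (fun c => c = ' ')).length = i := by
          rw [hdw, hdecomp]; simp
        have hA : stripGo (c :: rest) i i full = String.ofList full := by
          simp [stripGo, hc, hsp]
        have hB : stripAltList full = String.ofList full := by
          simp only [stripAltList]
          rw [hn, if_neg (show ¬ (4:ℕ) ≤ i by omega), hdw]; simp [hc]
        rw [hA, hB]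

-- ===== VERDICT (by name: the statement is the Claim_ definition above) =====
theorem strip_spec : Claim_equal_strip := by
  intro s _
  show strip s = strip_alt s
  rw [strip, strip_alt_eq_list]
  exact go_spec s.toList s.toList 0 (by simp) (by simp) (by omega)
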